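-- pv_equiv track=rewrite | github.com/stenknutsen/HomeGrownPOSTagger | PhaseFourTagging.py | PRP_to_UNK_N_Tagger
-- ===== SOURCE A (Python) =====
-- def PRP_to_UNK_N_Tagger(sent):
--     sentToReturn = []
--     skip = 0
--
--     for i in range(len(sent)):
--
--         if skip>0:
--             skip = skip -1
--             continue
--
--
--         if (i)<0 | (i+3)>=len(sent):
--             sentToReturn += [sent[i]]
--             continue
--
--         leftContext = sent[i]
--         leftTarget = sent[i+1]
--         rightTarget = sent[i+2]
--         rightContext = sent[i+3]
--
--
--         if (leftContext[1]=="PRP")&(leftTarget[0].lower()=="to")&(rightTarget[1]=="UNK")&(rightContext[1].startswith("N")):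
--
--             sentToReturn += [leftContext]
--             sentToReturn += [(leftTarget[0], "TO")]
--             sentToReturn += [(rightTarget[0],"V")]
--             sentToReturn += [rightContext]
--             skip = 3
--
--         else:
--             sentToReturn += [leftContext]
--
--     return sentToReturn
-- ===== SOURCE B (Python) =====
-- def PRP_to_UNK_N_Tagger(sent):
--     # Pass 1: collect greedy, non-overlapping match start positions.
--     starts = set()
--     i = 0
--     while i + 3 < len(sent):
--         if (sent[i][1] == "PRP" and sent[i+1][0].lower() == "to"
--                 and sent[i+2][1] == "UNK" and sent[i+3][1].startswith("N")):
--             starts.add(i)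
--             i += 4
--         else:
--             i += 1
--     # Pass 2: the words never change; rewrite only the tags one and two
--     # positions after each match start.
--     return [(w, "TO") if j - 1 in starts else (w, "V") if j - 2 in starts else (w, t)
--             for j, (w, t) in enumerate(sent)]
-- ===== Notes on version B (the rewrite author's own statement) =====
-- stated objective: alternative
-- what changed: Replaced A's single append-as-you-scan loop by two stages: a first pass that only records the greedy non-overlapping match start positions in a set, and a second pass that maps over the enumerated sentence rewriting just the tags at offsets +1 ('TO') and +2 ('V') of each recorded start, exploiting that the transformation is length- and word-preserving.
import Mathlib
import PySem

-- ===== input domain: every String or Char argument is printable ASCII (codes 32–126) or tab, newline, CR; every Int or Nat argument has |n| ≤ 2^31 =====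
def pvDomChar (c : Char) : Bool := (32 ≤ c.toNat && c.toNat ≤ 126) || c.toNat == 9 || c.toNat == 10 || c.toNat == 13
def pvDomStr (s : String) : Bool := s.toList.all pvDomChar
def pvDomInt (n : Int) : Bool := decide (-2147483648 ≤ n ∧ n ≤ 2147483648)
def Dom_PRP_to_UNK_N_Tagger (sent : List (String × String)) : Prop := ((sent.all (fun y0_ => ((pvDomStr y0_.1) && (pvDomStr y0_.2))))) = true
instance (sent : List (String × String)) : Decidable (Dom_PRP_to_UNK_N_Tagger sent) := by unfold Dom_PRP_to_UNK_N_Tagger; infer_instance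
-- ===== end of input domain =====

-- B replaces A's single append-as-you-scan loop by two stages: pass 1 records the
-- greedy match start positions in a set, pass 2 maps over the enumerated sentence
-- rewriting only the tags at offsets +1/+2 of each start; objective: alternative.

-- ===== PORT A =====
-- for-range loop with skip counter, transcribed as structural recursion over the index list
def PRP_goA (sent : List (String × String)) : List Int → Int → List (String × String) → List (String × String)
  | [], _, acc => acc
  | i :: rest, skip, acc =>
    if skip > 0 then PRP_goA sent rest (skip - 1) acc
    -- Python `(i)<0 | (i+3)>=len(sent)` is the chained comparison i < (0|(i+3)) >= len(sent)
    else if (i < PySem.Int.bor 0 (i+3)) ∧ (PySem.Int.bor 0 (i+3) ≥ (sent.length : Int)) then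
      PRP_goA sent rest skip (acc ++ [PySem.List.pyGetD sent i ("", "")])
    else
      let leftContext := PySem.List.pyGetD sent i ("", "")
      let leftTarget := PySem.List.pyGetD sent (i+1) ("", "")
      let rightTarget := PySem.List.pyGetD sent (i+2) ("", "")
      let rightContext := PySem.List.pyGetD sent (i+3) ("", "")
      if (leftContext.2 == "PRP") && (PySem.Str.lower leftTarget.1 == "to")
          && (rightTarget.2 == "UNK") && (PySem.Str.startswith rightContext.2 "N") then
        PRP_goA sent rest 3
          (acc ++ [leftContext] ++ [(leftTarget.1, "TO")] ++ [(rightTarget.1, "V")] ++ [rightContext])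
      else
        PRP_goA sent rest skip (acc ++ [leftContext])

def PRP_to_UNK_N_Tagger (sent : List (String × String)) : List (String × String) :=
  PRP_goA sent (PySem.List.pyRange 0 sent.length 1) 0 []

-- ===== PORT B =====
-- pass 1 of Source B: while loop collecting greedy match start positions into a set
def PRP_goStarts (sent : List (String × String)) (i : Nat) (starts : PySem.Set Int) : PySem.Set Int :=
  if i + 3 < sent.length then
    if ((sent.getD i ("", "")).2 == "PRP") && (PySem.Str.lower (sent.getD (i+1) ("", "")).1 == "to")
        && ((sent.getD (i+2) ("", "")).2 == "UNK") && (PySem.Str.startswith (sent.getD (i+3) ("", "")).2 "N") then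
      PRP_goStarts sent (i+4) (PySem.Set.add starts (i : Int))
    else
      PRP_goStarts sent (i+1) starts
  else starts
termination_by sent.length - i

-- the conditional expression of Source B's list comprehension
def PRP_row (starts : PySem.Set Int) (p : Int × (String × String)) : String × String :=
  if PySem.Set.contains starts (p.1 - 1) then (p.2.1, "TO")
  else if PySem.Set.contains starts (p.1 - 2) then (p.2.1, "V")
  else p.2

-- pass 2 of Source B: map over enumerate(sent) rewriting tags positionally
def PRP_to_UNK_N_Tagger_alt (sent : List (String × String)) : List (String × String) :=
  let starts := PRP_goStarts sent 0 PySem.Set.empty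
  (PySem.List.enumerate sent 0).map (PRP_row starts)

-- ===== PRECONDITION & SPEC =====
def Spec_PRP_to_UNK_N_Tagger (sent : List (String × String)) (out : List (String × String)) : Prop := out = PRP_to_UNK_N_Tagger_alt sent
instance (sent : List (String × String)) (out : List (String × String)) : Decidable (Spec_PRP_to_UNK_N_Tagger sent out) := by unfold Spec_PRP_to_UNK_N_Tagger; infer_instance

-- ===== CLAIM (what is proved, stated in full; the proofs are below) =====
def Claim_equal_PRP_to_UNK_N_Tagger : Prop := ∀ (sent : List (String × String)), Dom_PRP_to_UNK_N_Tagger sent → Spec_PRP_to_UNK_N_Tagger sent (PRP_to_UNK_N_Tagger sent)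

-- ===== LEMMAS AND PROOFS =====

-- the pure list of greedy match starts from index i (proof-side characterisation of pass 1)
def PRP_S (sent : List (String × String)) (i : Nat) : List Int :=
  if i + 3 < sent.length then
    if ((sent.getD i ("", "")).2 == "PRP") && (PySem.Str.lower (sent.getD (i+1) ("", "")).1 == "to")
        && ((sent.getD (i+2) ("", "")).2 == "UNK") && (PySem.Str.startswith (sent.getD (i+3) ("", "")).2 "N") then
      (i : Int) :: PRP_S sent (i+4)
    else
      PRP_S sent (i+1)
  else []
termination_by sent.length - i

lemma PRP_S_ge (sent : List (String × String)) :
    ∀ (k i : Nat) (x : Int), sent.length - i ≤ k → x ∈ PRP_S sent i → (i : Int) ≤ x := by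
  intro k
  induction k with
  | zero =>
    intro i x h hx
    rw [PRP_S, if_neg (by omega)] at hx
    simp at hx
  | succ k ih =>
    intro i x h hx
    rw [PRP_S] at hx
    by_cases hg : i + 3 < sent.length
    · rw [if_pos hg] at hx
      split_ifs at hx with hc
      · rcases List.mem_cons.1 hx with hx | hx
        · omega
        · have := ih (i+4) x (by omega) hx; push_cast at this ⊢; omega
      · have := ih (i+1) x (by omega) hx; push_cast at this ⊢; omega
    · rw [if_neg hg] at hx; simp at hx

lemma PRP_S_contains_lt (sent : List (String × String)) (i : Nat) (x : Int)
    (hx : x < (i : Int)) : (PRP_S sent i).contains x = false := by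
  have hm : x ∉ PRP_S sent i := fun hm => absurd (PRP_S_ge sent sent.length i x (by omega) hm) (by omega)
  simp only [List.contains_eq_mem, hm, decide_false]

lemma PRP_goStarts_eq (sent : List (String × String)) :
    ∀ (k i : Nat) (s : PySem.Set Int), sent.length - i ≤ k → (∀ x ∈ s, x < (i : Int)) →
      PRP_goStarts sent i s = s ++ PRP_S sent i := by
  intro k
  induction k with
  | zero =>
    intro i s h hs
    rw [PRP_goStarts, PRP_S, if_neg (by omega), if_neg (by omega)]
    simp
  | succ k ih =>
    intro i s h hs
    rw [PRP_goStarts, PRP_S]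
    by_cases hg : i + 3 < sent.length
    · rw [if_pos hg, if_pos hg]
      split_ifs with hc
      · have hadd : PySem.Set.add s (i : Int) = s ++ [(i : Int)] := by
          rw [PySem.Set.add, if_neg]
          have hm : (i : Int) ∉ s := fun hm => absurd (hs _ hm) (by omega)
          simp only [PySem.Set.contains_eq_listContains, List.contains_eq_mem, hm, decide_false,
            Bool.false_eq_true, not_false_eq_true]
        rw [hadd] at *
        rw [ih (i+4) _ (by omega) (by
          intro x hx
          rcases List.mem_append.1 hx with h' | h'
          · have := hs x h'; push_cast; omega
          · simp at h'; push_cast; omega)]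
        simp
      · exact ih (i+1) s (by omega) (by intro x hx; have := hs x hx; push_cast; omega)
    · rw [if_neg hg, if_neg hg]
      simp

lemma PRP_row_far (starts : List Int) (p : Int × (String × String))
    (h1 : starts.contains (p.1 - 1) = false) (h2 : starts.contains (p.1 - 2) = false) :
    PRP_row starts p = p.2 := by
  rw [PRP_row]
  simp only [PySem.Set.contains_eq_listContains, h1, h2]
  simp

lemma PRP_main (sent : List (String × String)) :
    ∀ (k i : Nat) (acc : List (String × String)), sent.length - i ≤ k →
      PRP_goA sent (PySem.List.pyRange (i : Int) (sent.length : Int) 1) 0 acc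
        = acc ++ (PySem.List.enumerate (sent.drop i) (i : Int)).map (PRP_row (PRP_S sent i)) := by
  intro k
  induction k with
  | zero =>
    intro i acc h
    rw [show PySem.List.pyRange (i:Int) (sent.length : Int) 1 = [] by
      simp [PySem.List.pyRange]; omega]
    rw [PRP_goA, List.drop_eq_nil_of_le (by omega)]
    simp [PySem.List.enumerate]
  | succ k ih =>
    intro i acc h
    by_cases hlt : i < sent.length
    · rw [PySem.List.pyRange_one_cons (by exact_mod_cast hlt)]
      rw [PRP_goA]
      rw [if_neg (by omega)]
      rw [show PySem.Int.bor 0 ((i:Int)+3) = (i:Int)+3 by rw [PySem.Int.bor_comm]; simp]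
      have hdrop : sent.drop i = sent.getD i ("","") :: sent.drop (i+1) := by
        rw [List.drop_eq_getElem_cons hlt, List.getD_eq_getElem sent _ hlt]
      by_cases htail : i + 4 ≤ sent.length
      · -- full window available: A's boundary guard is false
        rw [if_neg (by omega)]
        simp only [show (i:Int) + 1 = ((i+1 : Nat) : Int) by push_cast; ring,
          show (i:Int) + 2 = ((i+2 : Nat) : Int) by push_cast; ring,
          show (i:Int) + 3 = ((i+3 : Nat) : Int) by push_cast; ring,
          PySem.List.pyGetD_natCast]
        by_cases hc : ((sent.getD i ("","")).2 == "PRP")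
            && (PySem.Str.lower (sent.getD (i+1) ("","")).1 == "to")
            && ((sent.getD (i+2) ("","")).2 == "UNK")
            && (PySem.Str.startswith (sent.getD (i+3) ("","")).2 "N")
        · rw [if_pos hc]
          rw [PySem.List.pyRange_one_cons
              (show ((i+1:Nat):Int) < (sent.length:Int) by exact_mod_cast (by omega : i + 1 < sent.length)),
            PRP_goA, if_pos (by norm_num),
            show ((i+1:Nat):Int)+1 = ((i+2 : Nat) : Int) by push_cast; ring,
            PySem.List.pyRange_one_cons
              (show ((i+2:Nat):Int) < (sent.length:Int) by exact_mod_cast (by omega : i + 2 < sent.length)),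
            PRP_goA, if_pos (by norm_num),
            show ((i+2:Nat):Int)+1 = ((i+3 : Nat) : Int) by push_cast; ring,
            PySem.List.pyRange_one_cons
              (show ((i+3:Nat):Int) < (sent.length:Int) by exact_mod_cast (by omega : i + 3 < sent.length)),
            PRP_goA, if_pos (by norm_num),
            show ((i+3:Nat):Int)+1 = ((i+4 : Nat) : Int) by push_cast; ring]
          rw [show (3:Int)-1-1-1 = 0 by norm_num]
          -- B side: unfold the start set at i first, then apply the IH at i+4
          rw [PRP_S, if_pos (by omega : i + 3 < sent.length), if_pos hc]
          rw [ih (i+4) _ (by omega)]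
          rw [hdrop,
            show sent.drop (i+1) = sent.getD (i+1) ("","") :: sent.drop (i+2) by
              rw [List.drop_eq_getElem_cons (by omega : i+1 < sent.length),
                List.getD_eq_getElem sent _ (by omega : i+1 < sent.length)],
            show sent.drop (i+2) = sent.getD (i+2) ("","") :: sent.drop (i+3) by
              rw [List.drop_eq_getElem_cons (by omega : i+2 < sent.length),
                List.getD_eq_getElem sent _ (by omega : i+2 < sent.length)],
            show sent.drop (i+3) = sent.getD (i+3) ("","") :: sent.drop (i+4) by
              rw [List.drop_eq_getElem_cons (by omega : i+3 < sent.length),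
                List.getD_eq_getElem sent _ (by omega : i+3 < sent.length)]]
          simp only [PySem.List.enumerate_cons, List.map_cons]
          have hS' : ∀ (y : Int), y < (i:Int)+4 → y ≠ (i:Int) →
              ((i:Int) :: PRP_S sent (i+4)).contains y = false := by
            intro y hy hne
            rw [List.contains_cons]
            rw [PRP_S_contains_lt sent (i+4) y (by push_cast; omega)]
            simp [hne]
          have hSi : ((i:Int) :: PRP_S sent (i+4)).contains (i:Int) = true := by
            simp
          -- row i : unchanged
          rw [PRP_row_far _ _ (hS' _ (by omega) (by omega)) (hS' _ (by omega) (by omega))]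
          -- row i+1 : TO
          rw [show PRP_row ((i:Int) :: PRP_S sent (i+4)) ((i:Int)+1, sent.getD (i+1) ("",""))
                = ((sent.getD (i+1) ("","")).1, "TO") by
            rw [PRP_row]
            simp only [PySem.Set.contains_eq_listContains, show (i:Int)+1-1 = (i:Int) by ring, hSi]
            simp]
          -- row i+2 : V
          rw [show PRP_row ((i:Int) :: PRP_S sent (i+4)) ((i:Int)+1+1, sent.getD (i+2) ("",""))
                = ((sent.getD (i+2) ("","")).1, "V") by
            rw [PRP_row]
            simp only [PySem.Set.contains_eq_listContains,
              show (i:Int)+1+1-1 = (i:Int)+1 by ring, show (i:Int)+1+1-2 = (i:Int) by ring,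
              hS' ((i:Int)+1) (by omega) (by omega), hSi]
            simp]
          -- row i+3 : unchanged
          rw [PRP_row_far _ _
            (by rw [show (i:Int)+1+1+1-1 = (i:Int)+2 by ring]; exact hS' _ (by omega) (by omega))
            (by rw [show (i:Int)+1+1+1-2 = (i:Int)+1 by ring]; exact hS' _ (by omega) (by omega))]
          -- tail rows never look at start i
          have htailmap :
              (PySem.List.enumerate (sent.drop (i+4)) ((i:Int)+1+1+1+1)).map
                  (PRP_row ((i:Int) :: PRP_S sent (i+4)))
                = (PySem.List.enumerate (sent.drop (i+4)) ((i:Int)+1+1+1+1)).map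
                  (PRP_row (PRP_S sent (i+4))) := by
            apply List.map_congr_left
            intro p hp
            rcases (PySem.List.mem_enumerate_iff _ _ _).1 hp with ⟨kk, hk, rfl⟩
            rw [PRP_row, PRP_row]
            simp only [PySem.Set.contains_eq_listContains, List.contains_cons,
              show ((i:Int)+1+1+1+1+(kk:Int)-1 == (i:Int)) = false by simp; omega,
              show ((i:Int)+1+1+1+1+(kk:Int)-2 == (i:Int)) = false by simp; omega]
            simp
          rw [htailmap]
          rw [show ((i:Int)+1+1+1+1) = ((i+4 : Nat) : Int) by push_cast; ring]
          simp [List.append_assoc]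
        · rw [if_neg hc]
          rw [PRP_S, if_pos (by omega : i + 3 < sent.length), if_neg hc]
          rw [ih (i+1) _ (by omega)]
          rw [hdrop]
          simp only [PySem.List.enumerate_cons, List.map_cons]
          rw [PRP_row_far _ _
              (PRP_S_contains_lt sent (i+1) _ (by push_cast; omega))
              (PRP_S_contains_lt sent (i+1) _ (by push_cast; omega))]
          rw [show (i:Int)+1 = ((i+1 : Nat) : Int) by push_cast; ring]
          simp
      · -- tail: A's boundary guard fires; no window from here on, starts are empty
        rw [if_pos (by omega)]
        rw [PySem.List.pyGetD_natCast,
          show ((i:Int)+1) = ((i+1 : Nat) : Int) by push_cast; ring,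
          ih (i+1) _ (by omega)]
        rw [PRP_S, if_neg (by omega), PRP_S, if_neg (by omega)]
        rw [hdrop]
        simp only [PySem.List.enumerate_cons, List.map_cons]
        rw [PRP_row_far _ _ (by simp) (by simp)]
        rw [show (((i+1:Nat)):Int) = (i:Int)+1 by push_cast; ring]
        simp
    · rw [show PySem.List.pyRange (i:Int) (sent.length : Int) 1 = [] by
        simp [PySem.List.pyRange]; omega]
      rw [PRP_goA, List.drop_eq_nil_of_le (by omega)]
      simp [PySem.List.enumerate]

-- ===== VERDICT (by name: the statement is the Claim_ definition above) =====
theorem PRP_to_UNK_N_Tagger_spec : Claim_equal_PRP_to_UNK_N_Tagger := by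
  intro sent _
  unfold Spec_PRP_to_UNK_N_Tagger PRP_to_UNK_N_Tagger PRP_to_UNK_N_Tagger_alt
  rw [PRP_goStarts_eq sent sent.length 0 PySem.Set.empty (by omega) (by intro x hx; simp [PySem.Set.empty] at hx)]
  simpa using PRP_main sent sent.length 0 [] (by omega)
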